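-- pv_equiv track=rewrite | github.com/tangy83/HandyConnect | features/core_services/case_service.py | _determine_case_type
-- ===== SOURCE A (Python) =====
-- from typing import List, Dict, Optional, Any
--
-- def _determine_case_type(llm_result: Dict) -> str:
--     """Determine case type from LLM analysis"""
--     category = llm_result.get('category', '').lower()
--     summary = llm_result.get('summary', '').lower()
--
--     # Map categories to case types
--     if any(word in category for word in ['complaint', 'issue', 'problem', 'fault']):
--         return 'Complaint'
--     elif any(word in category for word in ['request', 'need', 'require', 'want']):
--         return 'Request'
--     elif any(word in category for word in ['question', 'inquiry', 'ask', 'wonder']):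
--         return 'Query'
--     elif any(word in category for word in ['feedback', 'comment', 'suggestion']):
--         return 'Feedback'
--     elif any(word in summary for word in ['maintenance', 'repair', 'fix']):
--         return 'Maintenance'
--     elif any(word in summary for word in ['billing', 'payment', 'invoice', 'charge']):
--         return 'Billing'
--     elif any(word in summary for word in ['security', 'break', 'unauthorized', 'access']):
--         return 'Security'
--     else:
--         return 'General'
-- ===== SOURCE B (Python) =====
-- def _determine_case_type(llm_result: dict) -> str:
--     """Determine case type: evaluate all rules exhaustively, pick the
--     highest-priority (lowest-index) matching rule instead of short-circuiting."""
--     category = llm_result.get('category', '').lower()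
--     summary = llm_result.get('summary', '').lower()
--     rules = [
--         (category, ('complaint', 'issue', 'problem', 'fault'), 'Complaint'),
--         (category, ('request', 'need', 'require', 'want'), 'Request'),
--         (category, ('question', 'inquiry', 'ask', 'wonder'), 'Query'),
--         (category, ('feedback', 'comment', 'suggestion'), 'Feedback'),
--         (summary, ('maintenance', 'repair', 'fix'), 'Maintenance'),
--         (summary, ('billing', 'payment', 'invoice', 'charge'), 'Billing'),
--         (summary, ('security', 'break', 'unauthorized', 'access'), 'Security'),
--     ]
--     matched = [i for i, (text, kws, _) in enumerate(rules) if any(k in text for k in kws)]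
--     return rules[min(matched)][2] if matched else 'General'
-- ===== Notes on version B (the rewrite author's own statement) =====
-- stated objective: alternative
-- what changed: Instead of a short-circuiting if/elif chain, B evaluates all seven keyword rules exhaustively, collects the indices of every matching rule, and returns the label of the minimum-index match (or 'General' if none matched).
import Mathlib
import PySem

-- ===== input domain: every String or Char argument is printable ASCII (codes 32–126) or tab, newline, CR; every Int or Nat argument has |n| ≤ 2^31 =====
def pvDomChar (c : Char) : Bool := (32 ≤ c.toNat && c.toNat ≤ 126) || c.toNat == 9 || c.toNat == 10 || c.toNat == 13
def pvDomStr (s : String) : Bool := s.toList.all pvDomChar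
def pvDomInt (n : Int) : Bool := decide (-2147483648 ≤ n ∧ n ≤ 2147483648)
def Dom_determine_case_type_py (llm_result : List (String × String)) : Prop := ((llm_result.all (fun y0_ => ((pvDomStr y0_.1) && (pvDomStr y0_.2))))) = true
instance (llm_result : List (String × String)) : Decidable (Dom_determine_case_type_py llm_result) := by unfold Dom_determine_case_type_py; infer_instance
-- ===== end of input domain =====

-- B evaluates all seven keyword rules exhaustively and returns the label of the minimum-index match (objective: alternative, same cost).


-- ===== PORT A =====
def determine_case_type_py (llm_result : List (String × String)) : String :=
  let category := PySem.Str.lower ((PySem.Dict.mk llm_result).getD "category" "")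
  let summary := PySem.Str.lower ((PySem.Dict.mk llm_result).getD "summary" "")
  if ["complaint", "issue", "problem", "fault"].any (fun word => PySem.Str.isIn word category) then
    "Complaint"
  else if ["request", "need", "require", "want"].any (fun word => PySem.Str.isIn word category) then
    "Request"
  else if ["question", "inquiry", "ask", "wonder"].any (fun word => PySem.Str.isIn word category) then
    "Query"
  else if ["feedback", "comment", "suggestion"].any (fun word => PySem.Str.isIn word category) then
    "Feedback"
  else if ["maintenance", "repair", "fix"].any (fun word => PySem.Str.isIn word summary) then
    "Maintenance"
  else if ["billing", "payment", "invoice", "charge"].any (fun word => PySem.Str.isIn word summary) then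
    "Billing"
  else if ["security", "break", "unauthorized", "access"].any (fun word => PySem.Str.isIn word summary) then
    "Security"
  else
    "General"

-- ===== PORT B =====
-- B: exhaustive rule evaluation; matched = indices of all matching rules, result = label at min(matched).
def determine_case_type_py_alt (llm_result : List (String × String)) : String :=
  let category := PySem.Str.lower ((PySem.Dict.mk llm_result).getD "category" "")
  let summary := PySem.Str.lower ((PySem.Dict.mk llm_result).getD "summary" "")
  let rules : List (String × List String × String) :=
    [ (category, ["complaint", "issue", "problem", "fault"], "Complaint"),
      (category, ["request", "need", "require", "want"], "Request"),
      (category, ["question", "inquiry", "ask", "wonder"], "Query"),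
      (category, ["feedback", "comment", "suggestion"], "Feedback"),
      (summary, ["maintenance", "repair", "fix"], "Maintenance"),
      (summary, ["billing", "payment", "invoice", "charge"], "Billing"),
      (summary, ["security", "break", "unauthorized", "access"], "Security") ]
  let matched : List Int :=
    ((PySem.List.enumerate rules 0).filter
      (fun p => p.2.2.1.any (fun k => PySem.Str.isIn k p.2.1))).map (·.1)
  match PySem.List.min? matched (fun i => i) with
  | some i => ((PySem.List.pyGet? rules i).getD ("", [], "General")).2.2
  | none => "General"

-- ===== PRECONDITION & SPEC =====
def Spec_determine_case_type_py (llm_result : List (String × String)) (out : String) : Prop := out = determine_case_type_py_alt llm_result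
instance (llm_result : List (String × String)) (out : String) : Decidable (Spec_determine_case_type_py llm_result out) := by unfold Spec_determine_case_type_py; infer_instance

-- ===== CLAIM (what is proved, stated in full; the proofs are below) =====
def Claim_equal_determine_case_type_py : Prop := ∀ (llm_result : List (String × String)), Dom_determine_case_type_py llm_result → Spec_determine_case_type_py llm_result (determine_case_type_py llm_result)

-- ===== LEMMAS AND PROOFS =====
-- Once the seven match tests are abstracted as booleans, both sides are closed
-- functions of them (and of the two strings, which only appear inside discarded
-- rule fields); 'decide' checks all 128 boolean cases after generalizing.

-- ===== VERDICT (by name: the statement is the Claim_ definition above) =====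
theorem determine_case_type_py_spec : Claim_equal_determine_case_type_py := by
  intro llm_result _
  unfold Spec_determine_case_type_py determine_case_type_py determine_case_type_py_alt
  set category := PySem.Str.lower ((PySem.Dict.mk llm_result).getD "category" "") with hc
  set summary := PySem.Str.lower ((PySem.Dict.mk llm_result).getD "summary" "") with hs
  simp only [PySem.List.enumerate, List.filter, List.any_cons, List.any_nil]
  rcases Bool.eq_false_or_eq_true ((PySem.Str.isIn "complaint" category || (PySem.Str.isIn "issue" category || (PySem.Str.isIn "problem" category || (PySem.Str.isIn "fault" category || false))))) with h0|h0 <;>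
  rcases Bool.eq_false_or_eq_true ((PySem.Str.isIn "request" category || (PySem.Str.isIn "need" category || (PySem.Str.isIn "require" category || (PySem.Str.isIn "want" category || false))))) with h1|h1 <;>
  rcases Bool.eq_false_or_eq_true ((PySem.Str.isIn "question" category || (PySem.Str.isIn "inquiry" category || (PySem.Str.isIn "ask" category || (PySem.Str.isIn "wonder" category || false))))) with h2|h2 <;>
  rcases Bool.eq_false_or_eq_true ((PySem.Str.isIn "feedback" category || (PySem.Str.isIn "comment" category || (PySem.Str.isIn "suggestion" category || false)))) with h3|h3 <;>
  rcases Bool.eq_false_or_eq_true ((PySem.Str.isIn "maintenance" summary || (PySem.Str.isIn "repair" summary || (PySem.Str.isIn "fix" summary || false)))) with h4|h4 <;>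
  rcases Bool.eq_false_or_eq_true ((PySem.Str.isIn "billing" summary || (PySem.Str.isIn "payment" summary || (PySem.Str.isIn "invoice" summary || (PySem.Str.isIn "charge" summary || false))))) with h5|h5 <;>
  rcases Bool.eq_false_or_eq_true ((PySem.Str.isIn "security" summary || (PySem.Str.isIn "break" summary || (PySem.Str.isIn "unauthorized" summary || (PySem.Str.isIn "access" summary || false))))) with h6|h6 <;>
  simp only [h0, h1, h2, h3, h4, h5, h6] <;> rfl
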